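-- pv_equiv track=rewrite | github.com/ryanjchrist/mohs-hardness-replication | src/data_loader.py | _find_hardness_column
-- ===== SOURCE A (Python) =====
-- from typing import List, Optional, Tuple
--
-- def _find_hardness_column(columns: List[str]) -> Optional[str]:
--     """Heuristic: pick the column whose name contains Mohs/hardness."""
--     lowered = {c: c.lower().strip() for c in columns}
--     candidates = []
--     for col, low in lowered.items():
--         if "hardness" in low or "mohs" in low:
--             candidates.append(col)
--     if not candidates:
--         return None
--     # Prefer columns that explicitly mention hardness.
--     hardness_priority = sorted(candidates, key=lambda c: ("hardness" not in lowered[c], len(c)))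
--     return hardness_priority[0]
-- ===== SOURCE B (Python) =====
-- from typing import List, Optional
--
-- def _find_hardness_column(columns: List[str]) -> Optional[str]:
--     """Heuristic: pick the column whose name contains Mohs/hardness."""
--     best = None
--     best_key = None
--     for col in columns:
--         low = col.lower().strip()
--         if "hardness" in low or "mohs" in low:
--             key = ("hardness" not in low, len(col))
--             if best is None or key < best_key:
--                 best, best_key = col, key
--     return best
-- ===== Notes on version B (the rewrite author's own statement) =====
-- stated objective: simpler
-- what changed: A builds a dict of lowered names, collects matching candidates, stable-sorts them by ('hardness' not in low, len(col)) and takes the first; B does one pass over the columns keeping the best (strictly-smaller-key, earliest-wins) matching column, with no dict and no sort.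
import Mathlib
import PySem

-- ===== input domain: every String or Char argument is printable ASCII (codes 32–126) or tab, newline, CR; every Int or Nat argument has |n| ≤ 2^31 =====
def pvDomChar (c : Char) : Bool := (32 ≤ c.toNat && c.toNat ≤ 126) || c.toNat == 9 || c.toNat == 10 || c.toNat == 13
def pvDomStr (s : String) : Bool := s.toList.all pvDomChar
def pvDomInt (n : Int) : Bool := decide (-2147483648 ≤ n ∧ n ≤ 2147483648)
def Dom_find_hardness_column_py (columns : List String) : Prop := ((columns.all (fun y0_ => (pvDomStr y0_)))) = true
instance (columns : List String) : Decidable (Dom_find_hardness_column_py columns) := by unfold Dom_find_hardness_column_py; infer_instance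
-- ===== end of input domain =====

-- B replaces A's build-dict / collect-candidates / stable-sort pipeline with a single pass that
-- keeps the best (smallest-key) matching column; objective: simpler (one loop, no dict, no sort).

-- ===== PORT A =====
def find_hardness_column_py (columns : List String) : Option String :=
  -- lowered = {c: c.lower().strip() for c in columns}
  let lowered : PySem.Dict String String :=
    columns.foldl (fun d c => d.insert c (PySem.Str.strip (PySem.Str.lower c))) PySem.Dict.empty
  -- for col, low in lowered.items(): if "hardness" in low or "mohs" in low: candidates.append(col)
  let candidates : List String :=
    lowered.items.foldl (fun acc p =>
      if PySem.Str.isIn "hardness" p.2 || PySem.Str.isIn "mohs" p.2 then acc ++ [p.1] else acc) []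
  if candidates = [] then none
  else
    -- sorted(candidates, key=lambda c: ("hardness" not in lowered[c], len(c)))[0]
    -- lowered[c]: KeyError impossible (every candidate is a key of lowered), ported as getD with an unused default
    match PySem.List.sorted2 candidates
        (fun c => !(PySem.Str.isIn "hardness" (lowered.getD c "")))
        (fun c => PySem.Str.len c) with
    | [] => none            -- unreachable: candidates ≠ []
    | h :: _ => some h

-- ===== PORT B =====
-- loop body of Source B's for-loop
def pvStepB (best : Option (String × (Bool × Int))) (col : String) : Option (String × (Bool × Int)) :=
  let low := PySem.Str.strip (PySem.Str.lower col)
  if PySem.Str.isIn "hardness" low || PySem.Str.isIn "mohs" low then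
    let key : Bool × Int := (!(PySem.Str.isIn "hardness" low), PySem.Str.len col)
    match best with
    | none => some (col, key)
    | some (b, bk) =>
        if (key.1 < bk.1 || (key.1 == bk.1 && key.2 < bk.2)) then some (col, key)
        else some (b, bk)
  else best

def find_hardness_column_py_alt (columns : List String) : Option String :=
  (columns.foldl pvStepB none).map (·.1)

-- ===== PRECONDITION & SPEC =====
def Spec_find_hardness_column_py (columns : List String) (out : Option String) : Prop := out = find_hardness_column_py_alt columns
instance (columns : List String) (out : Option String) : Decidable (Spec_find_hardness_column_py columns out) := by unfold Spec_find_hardness_column_py; infer_instance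

-- ===== CLAIM (what is proved, stated in full; the proofs are below) =====
def Claim_equal_find_hardness_column_py : Prop := ∀ (columns : List String), Dom_find_hardness_column_py columns → Spec_find_hardness_column_py columns (find_hardness_column_py columns)

-- ===== LEMMAS AND PROOFS =====

-- proof-side abbreviations
def pvLow (c : String) : String := PySem.Str.strip (PySem.Str.lower c)
def pvMatch (c : String) : Bool := PySem.Str.isIn "hardness" (pvLow c) || PySem.Str.isIn "mohs" (pvLow c)
def pvK1 (c : String) : Bool := !(PySem.Str.isIn "hardness" (pvLow c))
def pvK2 (c : String) : Int := PySem.Str.len c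
-- the strict comparison A's stable sort uses, specialised to our keys
def pvLt (x y : String) : Bool :=
  decide (pvK1 x < pvK1 y) || (!decide (pvK1 y < pvK1 x) && decide (pvK2 x < pvK2 y))
-- the tuple comparison B uses
def pvLtB (x y : String) : Bool :=
  decide (pvK1 x < pvK1 y) || (pvK1 x == pvK1 y && decide (pvK2 x < pvK2 y))
-- running first-minimum
def pvStep (lt : String → String → Bool) (b : Option String) (x : String) : Option String :=
  match b with | none => some x | some h => if lt x h then some x else some h
def pvMin (lt : String → String → Bool) (b : Option String) (xs : List String) : Option String :=
  xs.foldl (pvStep lt) b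
def pvTag (c : String) : String × (Bool × Int) := (c, (pvK1 c, pvK2 c))
-- remove-duplicates given already-seen elements
def pvRd (seen : List String) : List String → List String
  | [] => []
  | x :: xs => if seen.contains x then pvRd seen xs else x :: pvRd (seen ++ [x]) xs

-- A's dict and A's comparator, named
def pvDict (columns : List String) : PySem.Dict String String :=
  columns.foldl (fun d c => d.insert c (pvLow c)) PySem.Dict.empty
def pvLtA (columns : List String) (a b : String) : Bool :=
  decide ((!(PySem.Str.isIn "hardness" ((pvDict columns).getD a ""))) < (!(PySem.Str.isIn "hardness" ((pvDict columns).getD b "")))) ||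
  (!decide ((!(PySem.Str.isIn "hardness" ((pvDict columns).getD b ""))) < (!(PySem.Str.isIn "hardness" ((pvDict columns).getD a "")))) &&
   decide (PySem.Str.len a < PySem.Str.len b))

lemma pvMin_cons (lt : String → String → Bool) (b : Option String) (x : String) (l : List String) :
    pvMin lt b (x :: l) = pvMin lt (pvStep lt b x) l := rfl

lemma pvRd_cons (seen : List String) (x : String) (xs : List String) :
    pvRd seen (x :: xs) = if seen.contains x then pvRd seen xs else x :: pvRd (seen ++ [x]) xs := rfl

lemma pvLt_eq_pvLtB (x y : String) : pvLt x y = pvLtB x y := by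
  unfold pvLt pvLtB
  cases pvK1 x <;> cases pvK1 y <;> simp

lemma pvLt_irrefl (x : String) : pvLt x x = false := by
  unfold pvLt; cases pvK1 x <;> simp

lemma pvLt_not_lt_trans {x y h : String} (h1 : pvLt y h = false) (h2 : pvLt x h = true) :
    pvLt y x = false := by
  unfold pvLt at *
  cases hx : pvK1 x <;> cases hy : pvK1 y <;> cases hh : pvK1 h <;>
    simp [hx, hy, hh, Bool.lt_iff] at h1 h2 ⊢ <;> omega

-- head of an insertion-sort fold = running first-minimum
lemma head_foldl_insertBy (before : String → String → Bool) :
    ∀ (xs : List String) (acc : List String),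
      (xs.foldl (fun a x => PySem.List.insertBy before x a) acc).head? = pvMin before acc.head? xs := by
  intro xs
  induction xs with
  | nil => intro acc; rfl
  | cons x xs ih =>
      intro acc
      show (xs.foldl _ (PySem.List.insertBy before x acc)).head? = _
      rw [ih]
      have : (PySem.List.insertBy before x acc).head?
          = (match acc.head? with | none => some x | some h => if before x h then some x else some h) := by
        cases acc with
        | nil => rfl
        | cons h t => simp [PySem.List.insertBy]; split <;> simp
      rw [this]; rfl

-- the dict A builds maps every member of columns to its lowered/stripped form
lemma lowered_get? (columns : List String) (c : String) :
    (pvDict columns).get? c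
      = if c ∈ columns then some (pvLow c) else none := by
  unfold pvDict
  induction columns using List.reverseRecOn with
  | nil => simp [PySem.Dict.get?_empty]
  | append_singleton l x ih =>
      rw [List.foldl_append]
      simp only [List.foldl_cons, List.foldl_nil]
      rw [PySem.Dict.get?_insert, ih]
      by_cases hc : c = x <;> by_cases hm : c ∈ l <;> simp [hc, hm]

-- items of the dict A builds: first occurrences, tagged with their lowered forms
lemma lowered_items (columns : List String) :
    (pvDict columns).items
      = (PySem.Set.ofList columns).map (fun c => (c, pvLow c)) := by
  unfold pvDict
  have hnd : (columns.foldl (fun d c => d.insert c (pvLow c)) PySem.Dict.empty).keys.Nodup :=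
    PySem.Dict.nodup_keys_foldl_insert columns (fun _ c => pvLow c) _ PySem.Dict.nodup_keys_empty
  have hkeys : (columns.foldl (fun d c => d.insert c (pvLow c)) PySem.Dict.empty).keys
      = PySem.Set.ofList columns := by
    rw [PySem.Dict.keys_foldl_insert columns (fun _ c => pvLow c) PySem.Dict.empty]
    simp [PySem.Set.update, PySem.Set.ofList, PySem.Dict.keys_empty, PySem.Set.empty]
  rw [PySem.Dict.items_eq_map_keys _ hnd "", hkeys]
  apply List.map_congr_left
  intro k hk
  have hmem : k ∈ columns := (PySem.Set.mem_ofList columns k).mp hk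
  rw [PySem.Dict.getD_eq_get?_getD, show (List.foldl (fun d c => d.insert c (pvLow c)) PySem.Dict.empty columns) = pvDict columns from rfl, lowered_get?]
  simp [hmem]

lemma pvRd_spec : ∀ (xs seen : List String), List.foldl PySem.Set.add seen xs = seen ++ pvRd seen xs := by
  intro xs
  induction xs with
  | nil => intro seen; simp [pvRd]
  | cons x xs ih =>
      intro seen
      rw [List.foldl_cons, pvRd_cons]
      by_cases h : x ∈ seen
      · rw [show PySem.Set.add seen x = seen by simp [PySem.Set.add, h]]
        simp [h, ih]
      · rw [show PySem.Set.add seen x = seen ++ [x] by simp [PySem.Set.add, h]]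
        rw [ih]
        simp [h]

lemma pvRd_filter (m : String → Bool) :
    ∀ (xs seen : List String), pvRd (seen.filter m) (xs.filter m) = (pvRd seen xs).filter m := by
  intro xs
  induction xs with
  | nil => intro seen; simp [pvRd]
  | cons x xs ih =>
      intro seen
      rw [pvRd_cons seen x xs]
      by_cases hm : m x
      · rw [show (x :: xs).filter m = x :: xs.filter m by simp [hm]]
        rw [pvRd_cons]
        by_cases hs : x ∈ seen
        · simp [hs, List.mem_filter, hm, ih]
        · have hnf : x ∉ seen.filter m := by simp [List.mem_filter, hs]
          rw [if_neg (by simpa using hnf), if_neg (by simpa using hs)]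
          rw [show (seen.filter m) ++ [x] = (seen ++ [x]).filter m by simp [List.filter_append, hm]]
          rw [ih (seen ++ [x])]
          simp [hm]
      · rw [show (x :: xs).filter m = xs.filter m by simp [hm]]
        by_cases hs : x ∈ seen
        · simp [hs, ih]
        · rw [if_neg (by simpa using hs)]
          rw [show seen.filter m = (seen ++ [x]).filter m by simp [List.filter_append, hm]]
          rw [ih (seen ++ [x])]
          simp [hm]

-- later duplicates never strictly improve the running minimum
lemma pvMin_rd : ∀ (xs seen : List String) (b : Option String),
    (∀ y ∈ seen, ∃ h, b = some h ∧ pvLt y h = false) →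
    pvMin pvLt b (pvRd seen xs) = pvMin pvLt b xs := by
  intro xs
  induction xs with
  | nil => intro seen b _; rfl
  | cons x xs ih =>
      intro seen b hinv
      rw [pvRd_cons]
      by_cases hs : x ∈ seen
      · rw [if_pos (by simpa using hs)]
        obtain ⟨h, hb, hlt⟩ := hinv x hs
        rw [pvMin_cons, show pvStep pvLt b x = b by subst hb; simp [pvStep, hlt]]
        exact ih seen b hinv
      · rw [if_neg (by simpa using hs)]
        rw [pvMin_cons, pvMin_cons]
        apply ih (seen ++ [x])
        intro y hy
        rcases List.mem_append.mp hy with hy | hy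
        · obtain ⟨h, hb, hlt⟩ := hinv y hy
          subst hb
          by_cases hxh : pvLt x h
          · exact ⟨x, by simp [pvStep, hxh], pvLt_not_lt_trans hlt hxh⟩
          · exact ⟨h, by simp [pvStep, hxh], hlt⟩
        · have hxy : y = x := by simpa using hy
          subst hxy
          cases b with
          | none => exact ⟨y, rfl, pvLt_irrefl y⟩
          | some h =>
              by_cases hxh : pvLt y h
              · exact ⟨y, by simp [pvStep, hxh], pvLt_irrefl y⟩
              · exact ⟨h, by simp [pvStep, hxh], by simpa using hxh⟩

lemma pvMin_congr (lt1 lt2 : String → String → Bool) (L : List String)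
    (hagree : ∀ x ∈ L, ∀ y ∈ L, lt1 x y = lt2 x y) :
    ∀ (xs : List String), (∀ x ∈ xs, x ∈ L) → ∀ (b : Option String),
      (∀ h, b = some h → h ∈ L) → pvMin lt1 b xs = pvMin lt2 b xs := by
  intro xs
  induction xs with
  | nil => intro _ b _; rfl
  | cons x xs ih =>
      intro hsub b hb
      have hxL : x ∈ L := hsub x (by simp)
      rw [pvMin_cons, pvMin_cons]
      cases b with
      | none =>
          apply ih (fun z hz => hsub z (by simp [hz]))
          intro h hh
          have : h = x := by simpa [pvStep] using hh.symm
          subst this; exact hxL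
      | some h =>
          have hhL : h ∈ L := hb h rfl
          rw [show pvStep lt1 (some h) x = pvStep lt2 (some h) x by
            simp [pvStep, hagree x hxL h hhL]]
          apply ih (fun z hz => hsub z (by simp [hz]))
          intro h' hh'
          simp only [pvStep] at hh'
          split at hh' <;> simp_all

-- B's loop body, seen through the (column, key) tagging
lemma pvStepB_eq (s : Option String) (x : String) :
    pvStepB (s.map pvTag) x
      = if pvMatch x then (pvStep pvLtB s x).map pvTag else s.map pvTag := by
  unfold pvStepB pvStep pvMatch pvLtB pvTag pvK1 pvK2 pvLow
  cases s with
  | none =>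
      by_cases h1 : PySem.Str.isIn "hardness" (PySem.Str.strip (PySem.Str.lower x)) = true <;>
        by_cases h2 : PySem.Str.isIn "mohs" (PySem.Str.strip (PySem.Str.lower x)) = true <;>
        simp at h1 h2 <;> simp [h1, h2]
  | some b =>
      by_cases h1 : PySem.Str.isIn "hardness" (PySem.Str.strip (PySem.Str.lower x)) = true <;>
        by_cases h2 : PySem.Str.isIn "mohs" (PySem.Str.strip (PySem.Str.lower x)) = true <;>
        by_cases h3 : PySem.Str.isIn "hardness" (PySem.Str.strip (PySem.Str.lower b)) = true <;>
        by_cases hl : PySem.Str.len x < PySem.Str.len b <;>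
        simp at h1 h2 h3 hl <;> simp [h1, h2, h3, hl, Bool.lt_iff]
      all_goals rw [if_neg (by omega), if_neg (by omega)]
      all_goals simp [h3]

lemma alt_aux : ∀ (xs : List String) (s : Option String),
    xs.foldl pvStepB (s.map pvTag) = (pvMin pvLtB s (xs.filter pvMatch)).map pvTag := by
  intro xs
  induction xs with
  | nil => intro s; rfl
  | cons x xs ih =>
      intro s
      rw [List.foldl_cons, pvStepB_eq]
      by_cases hm : pvMatch x
      · rw [if_pos hm, show (x :: xs).filter pvMatch = x :: xs.filter pvMatch by simp [hm],
          pvMin_cons]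
        exact ih (pvStep pvLtB s x)
      · rw [if_neg hm, show (x :: xs).filter pvMatch = xs.filter pvMatch by simp [hm]]
        exact ih s

lemma alt_eq_min (columns : List String) :
    find_hardness_column_py_alt columns = pvMin pvLtB none (columns.filter pvMatch) := by
  unfold find_hardness_column_py_alt
  rw [show (none : Option (String × (Bool × Int))) = (none : Option String).map pvTag from rfl]
  rw [alt_aux]
  cases pvMin pvLtB none (columns.filter pvMatch) <;> rfl

-- A's candidate list is the matching part of the dedup'd columns
lemma a_candidates (columns : List String) :
    ((pvDict columns).items.foldl
      (fun acc p => if PySem.Str.isIn "hardness" p.2 || PySem.Str.isIn "mohs" p.2 then acc ++ [p.1] else acc) [])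
    = (PySem.Set.ofList columns).filter pvMatch := by
  rw [lowered_items,
    PySem.List.foldl_append_if
      (fun p : String × String => PySem.Str.isIn "hardness" p.2 || PySem.Str.isIn "mohs" p.2)
      (fun p : String × String => p.1)
      ((PySem.Set.ofList columns).map (fun c => (c, pvLow c))) []]
  rw [List.filter_map, List.map_map]
  have h : ((fun p : String × String => PySem.Str.isIn "hardness" p.2 || PySem.Str.isIn "mohs" p.2) ∘
      (fun c : String => (c, pvLow c))) = pvMatch := by
    funext c
    simp only [Function.comp_apply]
    rfl
  have h2 : ((fun p : String × String => p.1) ∘ (fun c : String => (c, pvLow c))) = fun c : String => c := by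
    funext c; rfl
  rw [h, h2]
  simp

-- the guarded sort-and-index of A is the head of the sorted list
lemma if_match_head (k1 : String → Bool) (k2 : String → Int) (l : List String) :
    (if l = [] then none
     else match PySem.List.sorted2 l k1 k2 with
          | [] => (none : Option String)
          | h :: _ => some h)
    = (PySem.List.sorted2 l k1 k2).head? := by
  by_cases h : l = []
  · subst h; rfl
  · rw [if_neg h]
    cases hs : PySem.List.sorted2 l k1 k2 <;> simp

-- ===== VERDICT (by name: the statement is the Claim_ definition above) =====
theorem find_hardness_column_py_spec : Claim_equal_find_hardness_column_py := by
  intro columns _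
  unfold Spec_find_hardness_column_py
  -- A's definition, with proof-side names folded in (definitional)
  have hA : find_hardness_column_py columns
      = (let lowered := pvDict columns
         let candidates := lowered.items.foldl
           (fun acc p => if PySem.Str.isIn "hardness" p.2 || PySem.Str.isIn "mohs" p.2 then acc ++ [p.1] else acc) []
         if candidates = [] then none
         else match PySem.List.sorted2 candidates
             (fun c => !(PySem.Str.isIn "hardness" (lowered.getD c "")))
             (fun c => PySem.Str.len c) with
           | [] => none
           | h :: _ => some h) := rfl
  rw [hA]
  simp only [if_match_head, a_candidates]
  -- sorted2 is a foldl of insertBy; its head is the running first-minimum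
  rw [show PySem.List.sorted2 ((PySem.Set.ofList columns).filter pvMatch)
      (fun c => !(PySem.Str.isIn "hardness" ((pvDict columns).getD c "")))
      (fun c => PySem.Str.len c)
    = ((PySem.Set.ofList columns).filter pvMatch).foldl
        (fun acc x => PySem.List.insertBy (pvLtA columns) x acc) [] from rfl]
  rw [head_foldl_insertBy]
  -- on members of the candidate list the dict lookup is pvLow, so A's comparator is pvLt
  have hmem : ∀ x ∈ (PySem.Set.ofList columns).filter pvMatch, x ∈ columns := by
    intro x hx
    exact (PySem.Set.mem_ofList columns x).mp (List.mem_of_mem_filter hx)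
  have hgetD : ∀ x ∈ (PySem.Set.ofList columns).filter pvMatch,
      (pvDict columns).getD x "" = pvLow x := by
    intro x hx
    rw [PySem.Dict.getD_eq_get?_getD, lowered_get?]
    simp [hmem x hx]
  have hcongr := pvMin_congr (pvLtA columns) pvLt ((PySem.Set.ofList columns).filter pvMatch)
    (by
      intro x hx y hy
      unfold pvLtA pvLt pvK1 pvK2
      rw [hgetD x hx, hgetD y hy])
    ((PySem.Set.ofList columns).filter pvMatch) (fun x hx => hx) none (by simp)
  rw [show (List.head? (α := String) []) = none from rfl, hcongr]
  -- replace the dedup'd candidate list by the plain filtered list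
  have h1 : (PySem.Set.ofList columns).filter pvMatch = pvRd [] (columns.filter pvMatch) := by
    have h2 : PySem.Set.ofList columns = pvRd [] columns := by
      have := pvRd_spec columns []
      simpa [PySem.Set.ofList, PySem.Set.empty] using this
    rw [h2]
    have := pvRd_filter pvMatch columns []
    simpa using this.symm
  rw [h1, pvMin_rd _ _ _ (by simp)]
  -- the two comparisons agree
  rw [alt_eq_min]
  exact (pvMin_congr pvLt pvLtB (columns.filter pvMatch)
    (fun x _ y _ => pvLt_eq_pvLtB x y) _ (fun x hx => hx) none (by simp))
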